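-- pv_equiv track=rewrite | github.com/shanghaiming/claw_work | quant_trade-main/strategies/price_action_ranges_psychological_training_system.py | _extract_key_learnings
-- ===== SOURCE A (Python) =====
-- from typing import Dict, List, Optional, Tuple, Any, Union
--
-- def _extract_key_learnings(session_data: Dict) -> List[str]:
--     """提取关键学习点"""
--     learnings = session_data.get('key_learnings', [])
--
--     # 如果没有提供，从会话数据推断
--     if not learnings:
--         focus_areas = session_data.get('focus_areas', [])
--         for area in focus_areas:
--             if 'emotional' in area.lower():
--                 learnings.append(f'提高了对{area}的理解和管理')
--             elif 'discipline' in area.lower():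
--                 learnings.append(f'加强了{area}的实践应用')
--             elif 'decision' in area.lower():
--                 learnings.append(f'改进了{area}的过程和方法')
--             elif 'stress' in area.lower():
--                 learnings.append(f'学习了{area}的识别和管理技巧')
--             elif 'confidence' in area.lower():
--                 learnings.append(f'建立了{area}的基础和改进方向')
--             else:
--                 learnings.append(f'在{area}方面有所进展')
--
--     # 限制数量
--     return learnings[:5]  # 最多5个关键学习点
-- ===== SOURCE B (Python) =====
-- def _extract_key_learnings(session_data):
--     """提取关键学习点 — staged-overwrite rewrite (return value only: unlike A,
--     B does not append into a caller-provided empty key_learnings list).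
--     Fill all slots with the default template, then one overwrite pass per
--     keyword category in reverse priority order, so the highest-priority
--     keyword's template is written last and wins."""
--     learnings = session_data.get('key_learnings', [])
--     if learnings:
--         return learnings[:5]
--     areas = session_data.get('focus_areas', [])
--     out = ['在{}方面有所进展'.format(a) for a in areas]
--     passes = [
--         ('confidence', '建立了{}的基础和改进方向'),
--         ('stress', '学习了{}的识别和管理技巧'),
--         ('decision', '改进了{}的过程和方法'),
--         ('discipline', '加强了{}的实践应用'),
--         ('emotional', '提高了对{}的理解和管理'),
--     ]
--     for kw, tmpl in passes:
--         for i, a in enumerate(areas):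
--             if kw in a.lower():
--                 out[i] = tmpl.format(a)
--     return out[:5]
-- ===== Notes on version B (the rewrite author's own statement) =====
-- stated objective: alternative
-- what changed: Replaces A's single pass with a per-area first-match if/elif chain by a staged-overwrite algorithm: fill every slot with the default template, then run one full overwrite pass per keyword category in reverse priority order so the highest-priority template is written last; return value only (B does not mutate a caller-provided empty key_learnings list).
import Mathlib
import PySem

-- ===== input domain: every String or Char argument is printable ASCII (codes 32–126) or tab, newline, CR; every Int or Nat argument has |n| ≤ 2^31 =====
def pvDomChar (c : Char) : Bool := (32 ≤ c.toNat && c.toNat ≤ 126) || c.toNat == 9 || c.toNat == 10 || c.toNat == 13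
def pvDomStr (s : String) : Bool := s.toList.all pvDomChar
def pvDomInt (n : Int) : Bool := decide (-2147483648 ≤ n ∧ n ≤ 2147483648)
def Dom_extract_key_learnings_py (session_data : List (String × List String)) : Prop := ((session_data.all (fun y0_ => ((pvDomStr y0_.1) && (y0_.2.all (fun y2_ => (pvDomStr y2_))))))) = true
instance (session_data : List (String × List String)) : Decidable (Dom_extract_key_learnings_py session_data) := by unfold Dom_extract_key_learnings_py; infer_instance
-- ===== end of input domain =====

-- B replaces A's single-pass per-area if/elif chain by a staged-overwrite algorithm (fill with
-- defaults, then one overwrite pass per keyword in reverse priority order); equivalence is about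
-- the RETURN value only — unlike A, B does not append into a caller-provided empty key_learnings list.

-- ===== PORT A =====
-- the body of A's for-loop (one elif chain appending to the accumulator), named for the fold
def pvLoopA (acc : List String) (area : String) : List String :=
  if PySem.Str.isIn "emotional" (PySem.Str.lower area) then
    acc ++ ["提高了对" ++ area ++ "的理解和管理"]
  else if PySem.Str.isIn "discipline" (PySem.Str.lower area) then
    acc ++ ["加强了" ++ area ++ "的实践应用"]
  else if PySem.Str.isIn "decision" (PySem.Str.lower area) then
    acc ++ ["改进了" ++ area ++ "的过程和方法"]
  else if PySem.Str.isIn "stress" (PySem.Str.lower area) then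
    acc ++ ["学习了" ++ area ++ "的识别和管理技巧"]
  else if PySem.Str.isIn "confidence" (PySem.Str.lower area) then
    acc ++ ["建立了" ++ area ++ "的基础和改进方向"]
  else
    acc ++ ["在" ++ area ++ "方面有所进展"]

def extract_key_learnings_py (session_data : List (String × List String)) : List String :=
  let learnings := PySem.Dict.getD (PySem.Dict.ofList session_data) "key_learnings" []
  let learnings :=
    if learnings.isEmpty then
      (PySem.Dict.getD (PySem.Dict.ofList session_data) "focus_areas" []).foldl pvLoopA learnings
    else learnings
  learnings.take 5

-- ===== PORT B =====
-- reverse-priority overwrite passes: (keyword, prefix, suffix)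
def pvPasses : List (String × String × String) :=
  [("confidence", "建立了", "的基础和改进方向"),
   ("stress", "学习了", "的识别和管理技巧"),
   ("decision", "改进了", "的过程和方法"),
   ("discipline", "加强了", "的实践应用"),
   ("emotional", "提高了对", "的理解和管理")]

-- one overwrite pass: slots of areas whose lowercase contains kw are overwritten
def pvPass (kw pre suf : String) (areas out : List String) : List String :=
  List.zipWith (fun a o => if PySem.Str.isIn kw (PySem.Str.lower a) then pre ++ a ++ suf else o)
    areas out

def extract_key_learnings_py_alt (session_data : List (String × List String)) : List String :=
  let learnings := PySem.Dict.getD (PySem.Dict.ofList session_data) "key_learnings" []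
  if learnings.isEmpty then
    let areas := PySem.Dict.getD (PySem.Dict.ofList session_data) "focus_areas" []
    let out0 := areas.map (fun a => "在" ++ a ++ "方面有所进展")
    (pvPasses.foldl (fun out t => pvPass t.1 t.2.1 t.2.2 areas out) out0).take 5
  else
    learnings.take 5

-- ===== PRECONDITION & SPEC =====
def Spec_extract_key_learnings_py (session_data : List (String × List String)) (out : List String) : Prop := out = extract_key_learnings_py_alt session_data
instance (session_data : List (String × List String)) (out : List String) : Decidable (Spec_extract_key_learnings_py session_data out) := by unfold Spec_extract_key_learnings_py; infer_instance

-- ===== CLAIM (what is proved, stated in full; the proofs are below) =====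
def Claim_equal_extract_key_learnings_py : Prop := ∀ (session_data : List (String × List String)), Dom_extract_key_learnings_py session_data → Spec_extract_key_learnings_py session_data (extract_key_learnings_py session_data)

-- ===== LEMMAS AND PROOFS =====

-- what A's elif chain renders for one area
def pvChain (area : String) : String :=
  if PySem.Str.isIn "emotional" (PySem.Str.lower area) then "提高了对" ++ area ++ "的理解和管理"
  else if PySem.Str.isIn "discipline" (PySem.Str.lower area) then "加强了" ++ area ++ "的实践应用"
  else if PySem.Str.isIn "decision" (PySem.Str.lower area) then "改进了" ++ area ++ "的过程和方法"
  else if PySem.Str.isIn "stress" (PySem.Str.lower area) then "学习了" ++ area ++ "的识别和管理技巧"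
  else if PySem.Str.isIn "confidence" (PySem.Str.lower area) then "建立了" ++ area ++ "的基础和改进方向"
  else "在" ++ area ++ "方面有所进展"

theorem pvLoopA_eq (acc : List String) (area : String) :
    pvLoopA acc area = acc ++ [pvChain area] := by
  unfold pvLoopA pvChain
  split_ifs <;> rfl

theorem foldl_pvLoopA (l : List String) (acc : List String) :
    l.foldl pvLoopA acc = acc ++ l.map pvChain := by
  induction l generalizing acc with
  | nil => simp
  | cons a l ih => simp [List.foldl_cons, pvLoopA_eq, ih]

-- a zipWith against a map of the same list is a map
theorem zipWith_map_self {α β γ : Type} (f : α → β → γ) (g : α → β) (l : List α) :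
    List.zipWith f l (l.map g) = l.map (fun a => f a (g a)) := by
  induction l with
  | nil => rfl
  | cons a l ih => simp [ih]

-- B's five staged overwrite passes equal a single map of A's chain renderer
theorem passes_eq_chain (areas : List String) :
    pvPasses.foldl (fun out t => pvPass t.1 t.2.1 t.2.2 areas out)
      (areas.map (fun a => "在" ++ a ++ "方面有所进展")) = areas.map pvChain := by
  simp only [pvPasses, List.foldl_cons, List.foldl_nil, pvPass, zipWith_map_self]
  apply List.map_congr_left
  intro a _
  unfold pvChain
  split_ifs <;> rfl

-- ===== VERDICT (by name: the statement is the Claim_ definition above) =====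
theorem extract_key_learnings_py_spec : Claim_equal_extract_key_learnings_py := by
  intro session_data _
  show _ = _
  unfold extract_key_learnings_py extract_key_learnings_py_alt
  cases h : (PySem.Dict.getD (PySem.Dict.ofList session_data) "key_learnings" ([] : List String)).isEmpty
  · simp only [h, Bool.false_eq_true, if_false]
  · simp only [h, if_true]
    rw [foldl_pvLoopA, List.isEmpty_iff.mp h, List.nil_append, passes_eq_chain]
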